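-- pv_equiv track=rewrite | github.com/sopify-ai/sopify | runtime/router.py | _split_active_plan_review_fragments
-- ===== SOURCE A (Python) =====
-- def _split_active_plan_review_fragments(text: str) -> tuple[str, ...]:
--     fragments: list[str] = []
--     current: list[str] = []
--     for char in str(text or ""):
--         if char in ",，;；:：.!！？?\n":
--             fragment = "".join(current).strip()
--             if fragment:
--                 fragments.append(fragment)
--             current = []
--             continue
--         current.append(char)
--     fragment = "".join(current).strip()
--     if fragment:
--         fragments.append(fragment)
--     return tuple(fragments)
-- ===== SOURCE B (Python) =====
-- _DELIMS = ",，;；:：.!！？?\n"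
-- _TABLE = str.maketrans({d: "\n" for d in _DELIMS})
--
--
-- def _split_active_plan_review_fragments(text: str) -> tuple[str, ...]:
--     # Phase 1: map every delimiter to '\n' and split once; phase 2: strip and drop empties.
--     pieces = str(text or "").translate(_TABLE).split("\n")
--     return tuple(p for p in map(str.strip, pieces) if p)
-- ===== Notes on version B (the rewrite author's own statement) =====
-- stated objective: idiomatic
-- what changed: Replaces the explicit char loop with running fragment/current buffers by a two-phase split-then-clean: translate all delimiters to newline, split once on newline, then strip each piece and keep the non-empty ones.
import Mathlib
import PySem

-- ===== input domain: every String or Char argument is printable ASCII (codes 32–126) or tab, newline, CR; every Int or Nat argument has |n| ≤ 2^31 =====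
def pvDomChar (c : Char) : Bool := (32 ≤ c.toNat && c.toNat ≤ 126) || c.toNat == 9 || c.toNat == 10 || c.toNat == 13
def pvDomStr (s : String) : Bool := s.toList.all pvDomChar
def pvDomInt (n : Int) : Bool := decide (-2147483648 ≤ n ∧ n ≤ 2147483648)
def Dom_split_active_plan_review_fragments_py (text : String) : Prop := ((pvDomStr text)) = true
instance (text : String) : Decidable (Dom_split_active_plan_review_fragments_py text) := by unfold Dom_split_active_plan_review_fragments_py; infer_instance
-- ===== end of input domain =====

-- B replaces A's explicit char loop (running fragments/current buffers) by a two-phase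
-- translate-delimiters-to-newline + split + strip/filter pipeline (idiomatic; same cost).


-- ===== PORT A =====
-- the delimiter string ",，;；:：.!！？?\n" as a char list
def pvDelims : List Char := ",，;；:：.!！？?\n".toList

-- the for-loop over the characters, carrying `fragments` and `current`
def pvALoop : List Char → List String → List Char → List String
  | [], fragments, current =>
      -- after the loop: fragment = "".join(current).strip(); if fragment: fragments.append(fragment)
      let fragment := PySem.Str.strip (String.ofList current)
      if fragment ≠ "" then fragments ++ [fragment] else fragments
  | c :: rest, fragments, current =>
      if c ∈ pvDelims then
        let fragment := PySem.Str.strip (String.ofList current)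
        pvALoop rest (if fragment ≠ "" then fragments ++ [fragment] else fragments) []
      else
        pvALoop rest fragments (current ++ [c])

def split_active_plan_review_fragments_py (text : String) : List String :=
  -- str(text or "") : `text or ""` is "" when text is empty, else text; str() is the identity on str
  pvALoop (if text = "" then "" else text).toList [] []

-- ===== PORT B =====
-- str.translate with _TABLE maps each delimiter char to '\n' and leaves every other char
-- unchanged; exact hand port of that table lookup:
def pvTrChar (c : Char) : Char := if c ∈ pvDelims then '\n' else c

def split_active_plan_review_fragments_py_alt (text : String) : List String :=
  let s := if text = "" then "" else text
  -- s.translate(_TABLE).split("\n"); the separator is the non-empty literal "\n", so split? is `some`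
  let pieces := (PySem.Str.split? (String.ofList (s.toList.map pvTrChar)) "\n").getD []
  (pieces.map PySem.Str.strip).filter (fun p => p ≠ "")

-- ===== PRECONDITION & SPEC =====
def Spec_split_active_plan_review_fragments_py (text : String) (out : List String) : Prop := out = split_active_plan_review_fragments_py_alt text
instance (text : String) (out : List String) : Decidable (Spec_split_active_plan_review_fragments_py text out) := by unfold Spec_split_active_plan_review_fragments_py; infer_instance

-- ===== CLAIM (what is proved, stated in full; the proofs are below) =====
def Claim_equal_split_active_plan_review_fragments_py : Prop := ∀ (text : String), Dom_split_active_plan_review_fragments_py text → Spec_split_active_plan_review_fragments_py text (split_active_plan_review_fragments_py text)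

-- ===== LEMMAS AND PROOFS =====

-- reference splitter: split a char list on '\n', `pre` being the piece built so far
def pvSplitNL (pre : List Char) : List Char → List (List Char)
  | [] => [pre]
  | c :: rest => if c = '\n' then pre :: pvSplitNL [] rest else pvSplitNL (pre ++ [c]) rest

-- strip each piece, keep the non-empty ones (the common "clean" phase)
def pvClean (gs : List (List Char)) : List String :=
  (gs.map (fun g => PySem.Str.strip (String.ofList g))).filter (fun p => p ≠ "")

theorem pvGo_eq (l : List Char) : ∀ (fuel : Nat) (cur : List Char) (acc : List (List Char)),
    l.length ≤ fuel →
    PySem.Chars.splitOn.go ['\n'] fuel l cur acc = acc.reverse ++ pvSplitNL cur.reverse l := by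
  induction l with
  | nil =>
      intro fuel cur acc _
      cases fuel <;> simp [PySem.Chars.splitOn.go, pvSplitNL]
  | cons c rest ih =>
      intro fuel cur acc hle
      cases fuel with
      | zero => simp at hle
      | succ f =>
        by_cases hc : c = '\n'
        · subst hc
          rw [show PySem.Chars.splitOn.go ['\n'] (f+1) ('\n'::rest) cur acc
                = PySem.Chars.splitOn.go ['\n'] f rest [] (cur.reverse :: acc) by
              simp [PySem.Chars.splitOn.go, List.isPrefixOf]]
          rw [ih f [] (cur.reverse :: acc) (by simpa using Nat.lt_succ_iff.mp (by simpa using hle))]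
          simp [pvSplitNL]
        · have hp : List.isPrefixOf ['\n'] (c :: rest) = false := by
            simp [List.isPrefixOf, Ne.symm hc]
          rw [show PySem.Chars.splitOn.go ['\n'] (f+1) (c::rest) cur acc
                = PySem.Chars.splitOn.go ['\n'] f rest (c :: cur) acc by
              simp [PySem.Chars.splitOn.go, hp]]
          rw [ih f (c :: cur) acc (by simpa using Nat.lt_succ_iff.mp (by simpa using hle))]
          simp [pvSplitNL, hc]

theorem pvSplitOn_newline (s : List Char) :
    PySem.Chars.splitOn s ['\n'] = pvSplitNL [] s := by
  rw [PySem.Chars.splitOn, pvGo_eq s (s.length + 1) [] [] (Nat.le_succ _)]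
  simp

theorem pvNotDelim_ne_newline {c : Char} (h : c ∉ pvDelims) : c ≠ '\n' := by
  intro hc; subst hc; exact h (by decide)

theorem pvALoop_eq (cs : List Char) : ∀ (fragments : List String) (current : List Char),
    pvALoop cs fragments current = fragments ++ pvClean (pvSplitNL current (cs.map pvTrChar)) := by
  induction cs with
  | nil =>
      intro fragments current
      by_cases h : PySem.Str.strip (String.ofList current) = "" <;>
        simp [pvALoop, pvClean, pvSplitNL, h]
  | cons c rest ih =>
      intro fragments current
      by_cases hd : c ∈ pvDelims
      · have htr : pvTrChar c = '\n' := by simp [pvTrChar, hd]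
        by_cases h : PySem.Str.strip (String.ofList current) = "" <;>
          simp [pvALoop, hd, h, ih, htr, pvSplitNL, pvClean]
      · have htr : pvTrChar c = c := by simp [pvTrChar, hd]
        simp [pvALoop, hd, ih, htr, pvSplitNL, pvNotDelim_ne_newline hd]

theorem pvAlt_eq (text : String) :
    split_active_plan_review_fragments_py_alt text
      = pvClean (pvSplitNL [] ((if text = "" then "" else text).toList.map pvTrChar)) := by
  rw [split_active_plan_review_fragments_py_alt]
  simp only [PySem.Str.split?, PySem.Chars.split?, String.toList_ofList,
    show "\n".toList = ['\n'] from rfl]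
  rw [pvSplitOn_newline]
  simp [pvClean, List.filter_map, Function.comp_def, PySem.Str.strip]

-- ===== VERDICT (by name: the statement is the Claim_ definition above) =====
theorem split_active_plan_review_fragments_py_spec : Claim_equal_split_active_plan_review_fragments_py := by
  intro text _
  show _ = _
  rw [split_active_plan_review_fragments_py, pvALoop_eq, pvAlt_eq]
  simp
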